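-- pv_equiv track=rewrite | github.com/victordibia/data2vis | utils/data_utils.py | get_count_freqs
-- ===== SOURCE A (Python) =====
-- from collections import Counter
--
-- def get_count_freqs(input_array):
--     counted_marks = (Counter(input_array))
--     counted_marks = list(sorted(counted_marks.items()))
--     counts_marks = []
--     freqs_marks = []
--     for row in counted_marks:
--         counts_marks.append(row[1])
--         freqs_marks.append(row[0])
--     return (counts_marks, freqs_marks)
-- ===== SOURCE B (Python) =====
-- def get_count_freqs(input_array):
--     s = sorted(input_array)
--     counts_marks = []
--     freqs_marks = []
--     i = 0
--     n = len(s)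
--     while i < n:
--         j = i + 1
--         while j < n and s[j] == s[i]:
--             j += 1
--         counts_marks.append(j - i)
--         freqs_marks.append(s[i])
--         i = j
--     return (counts_marks, freqs_marks)
-- ===== Notes on version B (the rewrite author's own statement) =====
-- stated objective: simpler
-- what changed: B drops the Counter dictionary entirely: it sorts a copy of the input and makes one pass over it, emitting each maximal run's length and value, which arrive already in sorted-key order.
import Mathlib
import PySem

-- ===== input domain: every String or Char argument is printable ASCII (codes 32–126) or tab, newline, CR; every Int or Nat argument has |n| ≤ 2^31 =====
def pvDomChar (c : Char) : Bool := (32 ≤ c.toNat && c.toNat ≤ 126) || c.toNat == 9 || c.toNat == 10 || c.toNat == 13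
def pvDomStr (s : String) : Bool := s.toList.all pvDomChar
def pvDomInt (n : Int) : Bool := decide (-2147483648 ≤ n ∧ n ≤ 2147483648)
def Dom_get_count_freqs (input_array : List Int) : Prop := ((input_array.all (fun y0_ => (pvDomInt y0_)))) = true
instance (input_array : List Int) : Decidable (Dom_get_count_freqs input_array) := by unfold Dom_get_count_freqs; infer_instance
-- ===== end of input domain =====

-- B replaces the Counter-dictionary pass by sort-then-group run-length counting (objective: alternative decomposition).

-- ===== PORT A =====
-- Counter(input_array) is PySem.Dict.counter. Python sorts the (key, count) tuples
-- lexicographically; the dict's keys are pairwise distinct, so sorting by the key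
-- component is exact here.
def get_count_freqs (input_array : List Int) : List Int × List Int :=
  let counted_marks : PySem.Dict Int Int := PySem.Dict.counter input_array
  let counted_list := PySem.List.sorted counted_marks.items (fun r => r.1) false
  let res := counted_list.foldl
    (fun (acc : List Int × List Int) row => (acc.1 ++ [row.2], acc.2 ++ [row.1]))
    (([] : List Int), ([] : List Int))
  (res.1, res.2)

-- ===== PORT B =====
-- inner while loop of Source B: length of the leading run of elements equal to x
def pvRunLen (x : Int) : List Int → Nat
  | [] => 0
  | y :: ys => if y = x then pvRunLen x ys + 1 else 0

-- outer while loop of Source B over the sorted list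
def pvRuns : List Int → List Int × List Int
  | [] => ([], [])
  | x :: xs =>
      let k := pvRunLen x xs
      let r := pvRuns (xs.drop k)
      (((k : Int) + 1) :: r.1, x :: r.2)
termination_by l => l.length
decreasing_by simp

def get_count_freqs_alt (input_array : List Int) : List Int × List Int :=
  pvRuns (PySem.List.sorted input_array (fun x => x) false)

-- ===== PRECONDITION & SPEC =====
def Spec_get_count_freqs (input_array : List Int) (out : List Int × List Int) : Prop := out = get_count_freqs_alt input_array
instance (input_array : List Int) (out : List Int × List Int) : Decidable (Spec_get_count_freqs input_array out) := by unfold Spec_get_count_freqs; infer_instance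

-- ===== CLAIM (what is proved, stated in full; the proofs are below) =====
def Claim_equal_get_count_freqs : Prop := ∀ (input_array : List Int), Dom_get_count_freqs input_array → Spec_get_count_freqs input_array (get_count_freqs input_array)

-- ===== LEMMAS AND PROOFS =====

-- A's output loop over the sorted items is the pair of component maps
lemma pvFoldlPair (l : List (Int × Int)) (cs ks : List Int) :
    l.foldl (fun (acc : List Int × List Int) row => (acc.1 ++ [row.2], acc.2 ++ [row.1])) (cs, ks)
      = (cs ++ l.map Prod.snd, ks ++ l.map Prod.fst) := by
  induction l generalizing cs ks with
  | nil => simp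
  | cons r t ih => simp [ih]

lemma pvTake_runLen (x : Int) (xs : List Int) :
    xs.take (pvRunLen x xs) = List.replicate (pvRunLen x xs) x := by
  induction xs with
  | nil => simp [pvRunLen]
  | cons y ys ih =>
      by_cases h : y = x
      · simp [pvRunLen, h, List.replicate_succ, ih]
      · simp [pvRunLen, h]

lemma pvDrop_runLen_head (x : Int) (xs : List Int) :
    xs.drop (pvRunLen x xs) = [] ∨
      ∃ z zs, xs.drop (pvRunLen x xs) = z :: zs ∧ z ≠ x := by
  induction xs with
  | nil => left; simp
  | cons y ys ih =>
      by_cases h : y = x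
      · simpa [pvRunLen, h] using ih
      · right; exact ⟨y, ys, by simp [pvRunLen, h], h⟩

-- the structural invariant of B's grouping loop on a sorted list
lemma pvRuns_spec : ∀ (l : List Int), l.Pairwise (· ≤ ·) →
    (pvRuns l).2.Pairwise (· < ·) ∧ (∀ v, v ∈ (pvRuns l).2 ↔ v ∈ l) ∧
      (pvRuns l).1 = (pvRuns l).2.map (fun k => (l.count k : Int)) := by
  suffices h : ∀ (n : Nat) (l : List Int), l.length ≤ n → l.Pairwise (· ≤ ·) →
      (pvRuns l).2.Pairwise (· < ·) ∧ (∀ v, v ∈ (pvRuns l).2 ↔ v ∈ l) ∧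
        (pvRuns l).1 = (pvRuns l).2.map (fun k => (l.count k : Int)) by
    intro l; exact h l.length l le_rfl
  intro n
  induction n with
  | zero =>
      intro l hl _
      have : l = [] := List.eq_nil_of_length_eq_zero (Nat.le_zero.mp hl)
      subst this; simp [pvRuns]
  | succ n ih' =>
      intro l hl hp
      match l with
      | [] => simp [pvRuns]
      | x :: xs =>
      set k := pvRunLen x xs with hk
      have ih : ∀ (l : List Int), l.length ≤ n → l.Pairwise (· ≤ ·) →
          (pvRuns l).2.Pairwise (· < ·) ∧ (∀ v, v ∈ (pvRuns l).2 ↔ v ∈ l) ∧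
            (pvRuns l).1 = (pvRuns l).2.map (fun v => (l.count v : Int)) := ih'
      simp only [pvRuns]
      rw [List.pairwise_cons] at hp
      obtain ⟨hx, hxs⟩ := hp
      set rest := xs.drop k with hrest
      have hsub : rest.Sublist xs := List.drop_sublist _ _
      have hrp : rest.Pairwise (· ≤ ·) := hxs.sublist hsub
      have hgt : ∀ w ∈ rest, x < w := by
        rcases pvDrop_runLen_head x xs with h0 | ⟨z, zs, hz, hzx⟩
        · rw [← hrest] at h0; simp [h0]
        · rw [← hrest] at hz
          have hzmem : z ∈ xs := hsub.mem (by simp [hz])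
          have hxz : x < z := lt_of_le_of_ne (hx z hzmem) (Ne.symm hzx)
          intro w hw
          rw [hz] at hw hrp
          rw [List.mem_cons] at hw
          rcases hw with rfl | hw
          · exact hxz
          · exact lt_of_lt_of_le hxz ((List.pairwise_cons.mp hrp).1 w hw)
      have hnx : x ∉ rest := fun h => lt_irrefl x (hgt x h)
      have hlen : rest.length ≤ n := by
        have := List.length_drop (l := xs) (i := k)
        simp at hl
        simp [hrest, this]; omega
      obtain ⟨ihp, ihmem, ihcnt⟩ := ih rest hlen hrp
      have hsplit : xs = List.replicate k x ++ rest := by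
        conv_lhs => rw [← List.take_append_drop k xs]
        rw [← hrest, pvTake_runLen]
      refine ⟨?_, ?_, ?_⟩
      · show ((x :: (pvRuns rest).2).Pairwise (· < ·))
        rw [List.pairwise_cons]
        exact ⟨fun w hw => hgt w ((ihmem w).mp hw), ihp⟩
      · intro v
        show v ∈ x :: (pvRuns rest).2 ↔ v ∈ x :: xs
        simp only [List.mem_cons, ihmem, hsplit, List.mem_append, List.mem_replicate]
        constructor
        · rintro (rfl | h); · left; rfl
          · right; right; exact h
        · rintro (rfl | ⟨_, rfl⟩ | h)
          · left; rfl
          · left; rfl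
          · right; exact h
      · show ((k : Int) + 1) :: (pvRuns rest).1
            = (x :: (pvRuns rest).2).map (fun v => ((x :: xs).count v : Int))
        have hcx : (x :: xs).count x = k + 1 := by
          rw [List.count_cons_self, hsplit, List.count_append,
            List.count_replicate_self, List.count_eq_zero_of_not_mem hnx]
        have hcv : ∀ v ∈ (pvRuns rest).2, (rest.count v : Int) = ((x :: xs).count v : Int) := by
          intro v hv
          have hvx : x < v := hgt v ((ihmem v).mp hv)
          have hne : v ≠ x := fun h => lt_irrefl x (h ▸ hvx)
          simp [hsplit, List.count_replicate, Ne.symm hne]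
        simp only [List.map_cons, hcx, ihcnt]
        rw [List.map_congr_left hcv]
        push_cast
        ring_nf
      
-- ===== VERDICT (by name: the statement is the Claim_ definition above) =====
theorem get_count_freqs_spec : Claim_equal_get_count_freqs := by
  intro input_array _
  unfold Spec_get_count_freqs get_count_freqs get_count_freqs_alt
  set ss := PySem.List.sorted input_array (fun x => x) false with hss
  have hsp : ss.Pairwise (· ≤ ·) := PySem.List.sorted_pairwise input_array (fun x => x)
  obtain ⟨hklt, hkmem, hcnt⟩ := pvRuns_spec ss hsp
  set ks := (pvRuns ss).2 with hks
  have hknd : ks.Nodup := hklt.imp (fun h => ne_of_lt h)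
  -- the sorted items of the counter are exactly ks paired with their counts
  have hsorted : PySem.List.sorted (PySem.Dict.counter input_array).items (fun r => r.1) false
      = ks.map (fun k => (k, (List.count k input_array : Int))) := by
    apply PySem.List.sorted_eq_of_perm_of_pairwise_lt
    · rw [PySem.Dict.items_counter]
      apply List.Perm.map
      rw [List.perm_ext_iff_of_nodup hknd (PySem.Set.nodup_ofList input_array)]
      intro v
      rw [PySem.Set.mem_ofList, hkmem v, hss, PySem.List.mem_sorted]
    · rw [List.pairwise_map]
      exact hklt
  have hcc : ∀ v ∈ ks, ((List.count v input_array : Nat) : Int) = ((ss.count v : Nat) : Int) := by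
    intro v _
    rw [List.Perm.count_eq (PySem.List.sorted_perm input_array (fun x => x) false)]
  simp only [hsorted, pvFoldlPair, List.map_map, List.nil_append]
  refine Prod.ext ?_ ?_
  · show ks.map ((fun r : Int × Int => r.2) ∘ fun k => (k, (List.count k input_array : Int)))
        = (pvRuns ss).1
    rw [hcnt]
    exact List.map_congr_left (by intro v hv; simpa using hcc v hv)
  · show ks.map ((fun r : Int × Int => r.1) ∘ fun k => (k, (List.count k input_array : Int)))
        = (pvRuns ss).2
    simp only [Function.comp_def]
    exact List.map_id' _
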